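-- pv_equiv track=rewrite | github.com/SharodX/keymark-heat-pumps | scripts/pipeline/transform_to_database.py | group_by_heat_pump
-- ===== SOURCE A (Python) =====
-- def group_by_heat_pump(records):
--     """
--     Group records by heat pump (title field marks boundaries).
--     Returns list of heat pump groups.
--     """
--     hp_groups = []
--     current_group = []
--
--     for rec in records:
--         if rec.get('varname') == 'title':
--             if current_group:
--                 hp_groups.append(current_group)
--             current_group = [rec]  # Start new group with title
--         else:
--             current_group.append(rec)
--
--     if current_group:
--         hp_groups.append(current_group)
--
--     return hp_groups
-- ===== SOURCE B (Python) =====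
-- def group_by_heat_pump(records):
--     """
--     Group records by heat pump (title field marks boundaries).
--     Staged decomposition: repeatedly peel off one group, where a group is the
--     first record plus the longest following run of non-title records.
--     """
--     def span_nontitle(rs):
--         # longest prefix of rs without a title record, and the remainder
--         g = []
--         for k, r in enumerate(rs):
--             if r.get('varname') == 'title':
--                 return g, rs[k:]
--             g.append(r)
--         return g, []
--
--     rest = list(records)
--     groups = []
--     while rest:
--         head, tail = rest[0], rest[1:]
--         g, rest = span_nontitle(tail)
--         groups.append([head] + g)
--     return groups
-- ===== Notes on version B (the rewrite author's own statement) =====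
-- stated objective: alternative
-- what changed: Replaces A's single flush-accumulator fold with a staged group-peeling decomposition: a span helper takes the longest run of non-title records, and an outer loop repeatedly emits head-plus-span as one group.
import Mathlib
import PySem

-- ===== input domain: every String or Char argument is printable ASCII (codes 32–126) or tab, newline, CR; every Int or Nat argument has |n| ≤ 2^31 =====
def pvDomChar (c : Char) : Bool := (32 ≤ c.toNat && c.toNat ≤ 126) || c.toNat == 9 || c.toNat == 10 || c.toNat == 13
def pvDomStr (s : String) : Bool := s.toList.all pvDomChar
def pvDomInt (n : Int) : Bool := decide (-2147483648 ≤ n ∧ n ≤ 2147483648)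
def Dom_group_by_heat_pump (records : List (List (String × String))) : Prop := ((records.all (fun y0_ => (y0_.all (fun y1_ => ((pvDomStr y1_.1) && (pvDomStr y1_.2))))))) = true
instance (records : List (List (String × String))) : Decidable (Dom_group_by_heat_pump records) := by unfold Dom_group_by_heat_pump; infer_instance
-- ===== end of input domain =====

-- B replaces A's flush-accumulator fold with a staged group-peeling decomposition
-- (span of non-title records after each head); alternative structure, same cost.


-- ===== PORT A =====
-- A's loop body: state is (hp_groups, current_group)
def aStep (st : List (List (List (String × String))) × List (List (String × String)))
    (rec : List (String × String)) :
    List (List (List (String × String))) × List (List (String × String)) :=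
  if PySem.Dict.get? (PySem.Dict.mk rec) "varname" = some "title" then
    (if st.2 ≠ [] then st.1 ++ [st.2] else st.1, [rec])
  else
    (st.1, st.2 ++ [rec])

def group_by_heat_pump (records : List (List (String × String))) : List (List (List (String × String))) :=
  let st := records.foldl aStep ([], [])
  if st.2 ≠ [] then st.1 ++ [st.2] else st.1

-- ===== PORT B =====
-- B's span helper: longest prefix without a title record, plus the remainder
def spanNontitle (rs : List (List (String × String))) :
    List (List (String × String)) × List (List (String × String)) :=
  match rs with
  | [] => ([], [])
  | r :: rs' =>
    if PySem.Dict.get? (PySem.Dict.mk r) "varname" = some "title" then ([], r :: rs')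
    else
      let p := spanNontitle rs'
      (r :: p.1, p.2)

theorem spanNontitle_snd_le (rs : List (List (String × String))) :
    (spanNontitle rs).2.length ≤ rs.length := by
  induction rs with
  | nil => simp [spanNontitle]
  | cons r rs' ih =>
    simp only [spanNontitle]
    split
    · simp
    · exact Nat.le_succ_of_le ih

-- B's outer loop: peel off one group (head + span of non-titles) at a time
def group_by_heat_pump_alt (records : List (List (String × String))) : List (List (List (String × String))) :=
  match records with
  | [] => []
  | r :: rs =>
    let p := spanNontitle rs
    (r :: p.1) :: group_by_heat_pump_alt p.2
termination_by records.length
decreasing_by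
  exact Nat.lt_succ_of_le (spanNontitle_snd_le rs)

-- ===== PRECONDITION & SPEC =====
def Spec_group_by_heat_pump (records : List (List (String × String))) (out : List (List (List (String × String)))) : Prop := out = group_by_heat_pump_alt records
instance (records : List (List (String × String))) (out : List (List (List (String × String)))) : Decidable (Spec_group_by_heat_pump records out) := by unfold Spec_group_by_heat_pump; infer_instance

-- ===== CLAIM (what is proved, stated in full; the proofs are below) =====
def Claim_equal_group_by_heat_pump : Prop := ∀ (records : List (List (String × String))), Dom_group_by_heat_pump records → Spec_group_by_heat_pump records (group_by_heat_pump records)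

-- ===== LEMMAS AND PROOFS =====

-- Invariant: running A's loop from (gs, cur) with cur ≠ [] and flushing equals
-- gs, then the group (cur glued to the next non-title span), then B on the rest.
theorem pv_key (rs : List (List (String × String)))
    (gs : List (List (List (String × String)))) (cur : List (List (String × String)))
    (hcur : cur ≠ []) :
    (let st := rs.foldl aStep (gs, cur)
     if st.2 ≠ [] then st.1 ++ [st.2] else st.1)
    = gs ++ (cur ++ (spanNontitle rs).1) :: group_by_heat_pump_alt (spanNontitle rs).2 := by
  induction rs generalizing gs cur with
  | nil =>
    simp [spanNontitle, group_by_heat_pump_alt, hcur]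
  | cons r rs' ih =>
    simp only [List.foldl, spanNontitle]
    by_cases ht : PySem.Dict.get? (PySem.Dict.mk r) "varname" = some "title"
    · rw [show aStep (gs, cur) r = (gs ++ [cur], [r]) by simp [aStep, ht, hcur]]
      rw [ih (gs ++ [cur]) [r] (by simp)]
      rw [if_pos ht]
      rw [show group_by_heat_pump_alt (r :: rs')
            = (r :: (spanNontitle rs').1) :: group_by_heat_pump_alt (spanNontitle rs').2 by
          rw [group_by_heat_pump_alt]]
      simp [List.append_assoc]
    · rw [show aStep (gs, cur) r = (gs, cur ++ [r]) by simp [aStep, ht]]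
      rw [ih gs (cur ++ [r]) (by simp)]
      simp [ht, List.append_assoc]

-- ===== VERDICT (by name: the statement is the Claim_ definition above) =====
theorem group_by_heat_pump_spec : Claim_equal_group_by_heat_pump := by
  intro records _
  unfold Spec_group_by_heat_pump group_by_heat_pump
  match records with
  | [] => simp [group_by_heat_pump_alt]
  | r :: rs =>
    have hstep : aStep ([], []) r = ([], [r]) := by
      by_cases ht : PySem.Dict.get? (PySem.Dict.mk r) "varname" = some "title" <;>
        simp [aStep, ht]
    simp only [List.foldl, hstep]
    rw [pv_key rs [] [r] (by simp)]
    rw [show group_by_heat_pump_alt (r :: rs)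
          = (r :: (spanNontitle rs).1) :: group_by_heat_pump_alt (spanNontitle rs).2 by
        rw [group_by_heat_pump_alt]]
    simp
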